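-- pv_equiv track=rewrite | github.com/laiyuchen164-creator/training | src/data.py | _split_question
-- ===== SOURCE A (Python) =====
-- def _split_question(question: str) -> tuple[list[str], str]:
--     premises = []
--     question_lines = []
--     seen_break = False
--     for raw_line in question.splitlines():
--         line = raw_line.strip()
--         if not line and not seen_break:
--             seen_break = True
--             continue
--         if not seen_break:
--             premises.append(line)
--         elif line:
--             question_lines.append(line)
--     return premises, "\n".join(question_lines)
-- ===== SOURCE B (Python) =====
-- def _split_question(question: str) -> tuple[list[str], str]:
--     lines = [raw.strip() for raw in question.splitlines()]
--     if '' not in lines: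
--         return lines, ""
--     idx = lines.index('')
--     question_lines = [l for l in lines[idx + 1:] if l]
--     return lines[:idx], "\n".join(question_lines)
-- ===== Notes on version B (the rewrite author's own statement) =====
-- stated objective: simpler
-- what changed: Replaces the carried seen_break flag and three-way branch with an explicit first-blank split index: strip all lines up front, locate the first blank line with list.index, slice premises before it and filter non-empty lines after it.
import Mathlib
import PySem

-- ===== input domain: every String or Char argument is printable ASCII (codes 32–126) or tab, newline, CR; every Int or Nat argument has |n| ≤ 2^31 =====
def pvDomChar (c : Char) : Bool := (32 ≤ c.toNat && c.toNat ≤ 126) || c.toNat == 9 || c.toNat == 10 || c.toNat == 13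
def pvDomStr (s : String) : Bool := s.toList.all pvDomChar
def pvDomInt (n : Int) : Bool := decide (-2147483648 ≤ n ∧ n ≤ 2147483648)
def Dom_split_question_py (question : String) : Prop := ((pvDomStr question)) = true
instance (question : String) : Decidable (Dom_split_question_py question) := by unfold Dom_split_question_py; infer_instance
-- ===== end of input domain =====

-- B replaces A's carried seen_break flag with an explicit first-blank split index and slices (simpler decomposition).

-- ===== PORT A =====
-- the loop state: (premises, question_lines, seen_break)
def splitQStepA (st : List String × List String × Bool) (raw : String) :
    List String × List String × Bool :=
  let line := PySem.Str.strip raw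
  if line = "" ∧ st.2.2 = false then (st.1, st.2.1, true)
  else if st.2.2 = false then (st.1 ++ [line], st.2.1, st.2.2)
  else if line ≠ "" then (st.1, st.2.1 ++ [line], st.2.2)
  else st

def split_question_py (question : String) : List String × String :=
  let r := (PySem.Str.splitlines question).foldl splitQStepA ([], [], false)
  (r.1, PySem.Str.join "\n" r.2.1)

-- ===== PORT B =====
def split_question_py_alt (question : String) : List String × String :=
  let lines := (PySem.Str.splitlines question).map PySem.Str.strip
  match PySem.List.index? lines "" with
  | none => (lines, "")
  | some idx =>
      (lines.take idx, PySem.Str.join "\n" ((lines.drop (idx + 1)).filter (· ≠ "")))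

-- ===== PRECONDITION & SPEC =====
def Spec_split_question_py (question : String) (out : List String × String) : Prop := out = split_question_py_alt question
instance (question : String) (out : List String × String) : Decidable (Spec_split_question_py question out) := by unfold Spec_split_question_py; infer_instance

-- ===== CLAIM (what is proved, stated in full; the proofs are below) =====
def Claim_equal_split_question_py : Prop := ∀ (question : String), Dom_split_question_py question → Spec_split_question_py question (split_question_py question)

-- ===== LEMMAS AND PROOFS =====

-- step applied to an already-stripped line (strip is idempotent-free here: we fold over stripped lines)
def splitQStep' (st : List String × List String × Bool) (line : String) :
    List String × List String × Bool :=
  if line = "" ∧ st.2.2 = false then (st.1, st.2.1, true)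
  else if st.2.2 = false then (st.1 ++ [line], st.2.1, st.2.2)
  else if line ≠ "" then (st.1, st.2.1 ++ [line], st.2.2)
  else st

theorem foldA_eq_fold' (ls : List String) (st : List String × List String × Bool) :
    ls.foldl splitQStepA st = (ls.map PySem.Str.strip).foldl splitQStep' st := by
  rw [List.foldl_map]; rfl

theorem fold'_no_blank (ls : List String) (p q : List String) (h : "" ∉ ls) :
    ls.foldl splitQStep' (p, q, false) = (p ++ ls, q, false) := by
  induction ls generalizing p with
  | nil => simp
  | cons x xs ih =>
      simp only [List.mem_cons, not_or] at h
      simp only [List.foldl_cons, splitQStep']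
      rw [if_neg (by simp [Ne.symm h.1])]
      simp only [if_true]
      rw [ih _ h.2]
      simp

theorem fold'_seen (ls : List String) (p q : List String) :
    ls.foldl splitQStep' (p, q, true) = (p, q ++ ls.filter (· ≠ ""), true) := by
  induction ls generalizing q with
  | nil => simp
  | cons x xs ih =>
      simp only [List.foldl_cons, splitQStep']
      by_cases hx : x = ""
      · subst hx
        simp [ih]
      · rw [if_neg (by simp [hx])]
        simp only [if_neg (by simp : ¬ (true = false)), if_pos hx]
        rw [ih]
        simp [hx]

-- ===== VERDICT (by name: the statement is the Claim_ definition above) =====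
theorem split_question_py_spec : Claim_equal_split_question_py := by
  intro question _
  unfold Spec_split_question_py split_question_py split_question_py_alt
  rw [foldA_eq_fold']
  dsimp only
  set ls := (PySem.Str.splitlines question).map PySem.Str.strip with hls
  rcases hidx : PySem.List.index? ls "" with _ | k
  · have hnot : "" ∉ ls := (PySem.List.index?_eq_none_iff ls "").mp hidx
    rw [fold'_no_blank ls [] [] hnot]
    simp [PySem.Str.join]
  · obtain ⟨pre, suf, hsplit, hlen, hnp⟩ := (PySem.List.index?_eq_some_iff ls "" k).mp hidx
    subst hlen
    rw [hsplit]
    rw [List.foldl_append, fold'_no_blank pre [] [] hnp, List.foldl_cons]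
    have hstep : splitQStep' ([] ++ pre, [], false) "" = (pre, [], true) := by
      simp [splitQStep']
    rw [hstep, fold'_seen]
    have hdrop : (pre ++ "" :: suf).drop (pre.length + 1) = suf := by
      simp [List.drop_append]
    have htake : (pre ++ "" :: suf).take pre.length = pre := List.take_left ..
    simp [hdrop, htake]
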